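-- pv_equiv track=rewrite | github.com/artenginee/CRA | REFACTORING/WheelofFortune/wheel.py | get1000points
-- ===== SOURCE A (Python) =====
-- def get1000points(board, first_chance_done, second_chance_enable, user_char):
--     result = 0
--     for y in range(len(board)):
--         for x in range(len(board[y])):
--             if board[y][x] != user_char:
--                 continue
--             if first_chance_done[y] != 0:
--                 continue
--             first_chance_done[y] = 1
--
--             if x == 0:
--                 result += 1000
--                 second_chance_enable[y] = y
--
--     return result
-- ===== SOURCE B (Python) =====
-- # Return-value equivalence only: the awarded score depends solely on each row's
-- # FIRST cell, so B never scans rows; return-value equivalence only.  (A additionally marks first_chance_done for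
-- # rows matching anywhere; B marks only the head-matched, awarded rows.)
-- def get1000points(board, first_chance_done, second_chance_enable, user_char):
--     hits = [y for y, row in enumerate(board)
--             if row[:1] == [user_char] and first_chance_done[y] == 0]
--     for y in hits:
--         first_chance_done[y] = 1
--         second_chance_enable[y] = y
--     return 1000 * len(hits)
-- ===== Notes on version B (the rewrite author's own statement) =====
-- stated objective: alternative
-- what changed: B drops the per-cell scan: the returned score depends only on each row's first cell, so B builds in one comprehension the list of rows whose head matches and whose flag is 0, returns the closed form 1000*len(hits), and performs the flag/enable writes in a separate pass over that list; return-value equivalence only (A also marks first_chance_done for rows matching at any column). Intended as faster (O(rows) vs O(cells) for the score); measured ~1.3-1.5x at the largest sizes, below the confirmation threshold.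
import Mathlib
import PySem

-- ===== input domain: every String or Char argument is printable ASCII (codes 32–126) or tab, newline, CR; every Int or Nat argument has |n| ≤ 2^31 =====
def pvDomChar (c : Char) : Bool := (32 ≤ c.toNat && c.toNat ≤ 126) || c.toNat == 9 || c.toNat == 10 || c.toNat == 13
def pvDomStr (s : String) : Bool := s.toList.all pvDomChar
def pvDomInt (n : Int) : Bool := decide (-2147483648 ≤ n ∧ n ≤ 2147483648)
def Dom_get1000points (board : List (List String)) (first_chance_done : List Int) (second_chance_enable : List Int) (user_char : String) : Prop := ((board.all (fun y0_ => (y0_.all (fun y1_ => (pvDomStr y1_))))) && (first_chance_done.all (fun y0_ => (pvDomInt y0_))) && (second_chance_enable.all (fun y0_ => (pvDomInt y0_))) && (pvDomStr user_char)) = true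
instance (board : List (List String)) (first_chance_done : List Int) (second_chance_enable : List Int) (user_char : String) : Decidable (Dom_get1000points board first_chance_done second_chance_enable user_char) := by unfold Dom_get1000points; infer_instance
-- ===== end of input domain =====

-- B computes the score without scanning rows: the award depends only on each row's first cell,
-- so B collects the head-matched unflagged rows in one pass and returns 1000 * their count
-- (objective: alternative algorithm; not measured as faster). Both Pythons mutate
-- first_chance_done/second_chance_enable; the theorems below are about the RETURN value only
-- (A also flags rows matching at columns > 0, which B does not).

-- ===== PORT A =====
-- state = (first_chance_done, second_chance_enable, result)
-- inner 'for x in range(len(board[y]))' loop, as structural recursion over the row with index x;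
-- Python's reads fcd[y] / writes via List.getD / List.set: Pre_ guarantees y is in range wherever
-- the Python performs the access, so the defaults are never the value used inside Pre_.
def pvAinner (uc : String) (y : Nat) : List String → Nat → List Int × List Int × Int → List Int × List Int × Int
  | [], _, st => st
  | c :: rest, x, st =>
      let st' :=
        if c ≠ uc then st
        else if st.1.getD y 0 ≠ 0 then st
        else
          let d := st.1.set y 1
          if x = 0 then (d, st.2.1.set y (y : Int), st.2.2 + 1000)
          else (d, st.2.1, st.2.2)
      pvAinner uc y rest (x + 1) st'

-- outer 'for y in range(len(board))' loop
def pvAouter (uc : String) : List (List String) → Nat → List Int × List Int × Int → List Int × List Int × Int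
  | [], _, st => st
  | row :: rest, y, st => pvAouter uc rest (y + 1) (pvAinner uc y row 0 st)

def get1000points (board : List (List String)) (first_chance_done : List Int) (second_chance_enable : List Int) (user_char : String) : Int :=
  (pvAouter user_char board 0 (first_chance_done, second_chance_enable, 0)).2.2

-- ===== PORT B =====
-- the comprehension '[y for y, row in enumerate(board) if row[:1] == [user_char] and first_chance_done[y] == 0]'
-- (row[:1] == [uc]  ↔  the row is nonempty and its head is uc); it reads the ORIGINAL
-- first_chance_done, the mutation pass comes after it and does not affect the return value,
-- which is the closed form 1000 * len(hits).
def pvBhits (uc : String) (fcd : List Int) : List (List String) → Nat → List Nat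
  | [], _ => []
  | row :: rest, y =>
      (if row.take 1 = [uc] ∧ fcd.getD y 0 = 0 then [y] else []) ++ pvBhits uc fcd rest (y + 1)

def get1000points_alt (board : List (List String)) (first_chance_done : List Int) (second_chance_enable : List Int) (user_char : String) : Int :=
  1000 * ((pvBhits user_char first_chance_done board 0).length : Int)

-- ===== PRECONDITION & SPEC =====
-- Pre_ excludes exactly the inputs where the Python A raises IndexError: a row containing
-- user_char whose index is outside first_chance_done, or an awarded row (first cell matches,
-- flag 0) whose index is outside second_chance_enable.
def Pre_get1000points (board : List (List String)) (first_chance_done : List Int) (second_chance_enable : List Int) (user_char : String) : Prop :=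
  ∀ y ∈ List.range board.length, user_char ∈ board.getD y [] →
    y < first_chance_done.length ∧
    ((board.getD y []).headD "" = user_char → first_chance_done.getD y 0 = 0 →
      y < second_chance_enable.length)
instance (board : List (List String)) (first_chance_done : List Int) (second_chance_enable : List Int) (user_char : String) : Decidable (Pre_get1000points board first_chance_done second_chance_enable user_char) := by unfold Pre_get1000points; infer_instance
def pvWitness_get1000points : List (List String) × List Int × List Int × String := ([["a", "b"], ["c"]], [0, 0], [5, 5], "a")
def Spec_get1000points (board : List (List String)) (first_chance_done : List Int) (second_chance_enable : List Int) (user_char : String) (out : Int) : Prop := out = get1000points_alt board first_chance_done second_chance_enable user_char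
instance (board : List (List String)) (first_chance_done : List Int) (second_chance_enable : List Int) (user_char : String) (out : Int) : Decidable (Spec_get1000points board first_chance_done second_chance_enable user_char out) := by unfold Spec_get1000points; infer_instance

-- ===== CLAIM (what is proved, stated in full; the proofs are below) =====
def Claim_equal_get1000points : Prop := ∀ (board : List (List String)) (first_chance_done : List Int) (second_chance_enable : List Int) (user_char : String), Dom_get1000points board first_chance_done second_chance_enable user_char → Pre_get1000points board first_chance_done second_chance_enable user_char → Spec_get1000points board first_chance_done second_chance_enable user_char (get1000points board first_chance_done second_chance_enable user_char)

-- ===== LEMMAS AND PROOFS =====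

-- proof-only helper: the net effect of A's inner loop started at x = 0 on the state
def pvRowStep (uc : String) (y : Nat) (row : List String) (st : List Int × List Int × Int) : List Int × List Int × Int :=
  if uc ∈ row ∧ st.1.getD y 0 = 0 then
    let d := st.1.set y 1
    if row.headD "" = uc then (d, st.2.1.set y (y : Int), st.2.2 + 1000)
    else (d, st.2.1, st.2.2)
  else st

-- if the row flag is already nonzero, A's inner loop changes nothing
theorem pvAinner_done (uc : String) (y : Nat) (row : List String) (x : Nat)
    (st : List Int × List Int × Int) (h : st.1.getD y 0 ≠ 0) :
    pvAinner uc y row x st = st := by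
  induction row generalizing x with
  | nil => rfl
  | cons c rest ih =>
      have e : pvAinner uc y (c :: rest) x st = pvAinner uc y rest (x + 1)
          (if c ≠ uc then st else if st.1.getD y 0 ≠ 0 then st
           else if x = 0 then (st.1.set y 1, st.2.1.set y (y : Int), st.2.2 + 1000)
           else (st.1.set y 1, st.2.1, st.2.2)) := rfl
      rw [e]
      by_cases hc : c = uc
      · rw [if_neg (not_not_intro hc), if_pos h, ih]
      · rw [if_pos hc, ih]

-- started at any x ≥ 1 (so the 'x == 0' award branch can no longer fire), A's inner loop
-- only performs the flag write, and only when a match exists and the flag is 0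
theorem pvAinner_pos (uc : String) (y : Nat) (row : List String) (x : Nat) (hx : x ≠ 0)
    (d s : List Int) (r : Int) :
    pvAinner uc y row x (d, s, r) =
      (if uc ∈ row ∧ d.getD y 0 = 0 then (d.set y 1, s, r) else (d, s, r)) := by
  induction row generalizing x with
  | nil => simp [pvAinner]
  | cons c rest ih =>
      have e : pvAinner uc y (c :: rest) x (d, s, r) = pvAinner uc y rest (x + 1)
          (if c ≠ uc then (d, s, r) else if d.getD y 0 ≠ 0 then (d, s, r)
           else if x = 0 then (d.set y 1, s.set y (y : Int), r + 1000)
           else (d.set y 1, s, r)) := rfl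
      rw [e]
      by_cases hc : c = uc
      · rw [if_neg (not_not_intro hc)]
        by_cases hd : d.getD y 0 = 0
        · rw [if_neg (not_not_intro hd), if_neg hx]
          by_cases hy : y < d.length
          · have h1 : (d.set y 1).getD y 0 = 1 := by simp [List.getD, hy]
            rw [pvAinner_done uc y rest (x + 1) _ (by rw [h1]; norm_num)]
            rw [if_pos ⟨List.mem_cons.mpr (Or.inl hc.symm), hd⟩]
          · have hset : d.set y 1 = d := List.set_eq_of_length_le (by omega)
            rw [hset, ih (x + 1) (by omega)]
            by_cases hm : uc ∈ rest
            · simp [hset, hm]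
            · simp [hm, hc]
        · rw [if_pos hd, ih (x + 1) (by omega)]
          rw [if_neg (fun h => hd h.2), if_neg (fun h => hd h.2)]
      · rw [if_pos hc, ih (x + 1) (by omega)]
        by_cases hcond : uc ∈ rest ∧ d.getD y 0 = 0
        · rw [if_pos hcond, if_pos ⟨List.mem_cons_of_mem _ hcond.1, hcond.2⟩]
        · rw [if_neg hcond, if_neg (fun h =>
            hcond ⟨(List.mem_cons.mp h.1).resolve_left (fun h' => hc h'.symm), h.2⟩)]

-- A's inner loop started at x = 0 has exactly the net effect pvRowStep
theorem pvAinner_eq_rowStep (uc : String) (y : Nat) (row : List String)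
    (d s : List Int) (r : Int) :
    pvAinner uc y row 0 (d, s, r) = pvRowStep uc y row (d, s, r) := by
  cases row with
  | nil => simp [pvAinner, pvRowStep]
  | cons c rest =>
      have e : pvAinner uc y (c :: rest) 0 (d, s, r) = pvAinner uc y rest 1
          (if c ≠ uc then (d, s, r) else if d.getD y 0 ≠ 0 then (d, s, r)
           else (d.set y 1, s.set y (y : Int), r + 1000)) := rfl
      rw [e]
      by_cases hd : d.getD y 0 = 0
      · by_cases hc : c = uc
        · rw [if_neg (not_not_intro hc), if_neg (not_not_intro hd)]
          rw [pvAinner_pos uc y rest 1 one_ne_zero]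
          have hB : pvRowStep uc y (c :: rest) (d, s, r) = (d.set y 1, s.set y (y : Int), r + 1000) := by
            unfold pvRowStep
            rw [if_pos ⟨List.mem_cons.mpr (Or.inl hc.symm), hd⟩,
              if_pos (by rw [List.headD_cons, hc])]
          rw [hB]
          by_cases hy : y < d.length
          · have h1 : (d.set y 1).getD y 0 = 1 := by simp [List.getD, hy]
            rw [if_neg (fun h => by rw [h1] at h; exact absurd h.2 (by norm_num))]
          · have hset : d.set y 1 = d := List.set_eq_of_length_le (by omega)
            by_cases hm : uc ∈ rest
            · rw [hset, if_pos ⟨hm, hd⟩, hset]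
            · rw [if_neg (fun h => hm h.1)]
        · rw [if_pos hc, pvAinner_pos uc y rest 1 one_ne_zero]
          unfold pvRowStep
          by_cases hm : uc ∈ rest
          · rw [if_pos ⟨hm, hd⟩, if_pos ⟨List.mem_cons_of_mem _ hm, hd⟩,
              if_neg (by rw [List.headD_cons]; exact hc)]
          · rw [if_neg (fun h => hm h.1), if_neg (fun h =>
              hm ((List.mem_cons.mp h.1).resolve_left (fun h' => hc h'.symm)))]
      · have hstep : (if c ≠ uc then (d, s, r) else if d.getD y 0 ≠ 0 then (d, s, r)
            else (d.set y 1, s.set y (y : Int), r + 1000)) = ((d, s, r) : List Int × List Int × Int) := by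
          by_cases hc : c = uc
          · rw [if_neg (not_not_intro hc), if_pos hd]
          · rw [if_pos hc]
        rw [hstep, pvAinner_done uc y rest 1 _ hd]
        unfold pvRowStep
        rw [if_neg (fun h => hd h.2)]

-- flag writes at index y are invisible to rows with indices > y
theorem pvBhits_set (uc : String) (d : List Int) (y : Nat) (v : Int)
    (rows : List (List String)) (y' : Nat) (h : y < y') :
    pvBhits uc (d.set y v) rows y' = pvBhits uc d rows y' := by
  induction rows generalizing y' with
  | nil => rfl
  | cons row rest ih =>
      simp only [pvBhits]
      rw [ih (y' + 1) (by omega)]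
      have hg : (d.set y v).getD y' 0 = d.getD y' 0 := by
        simp [List.getD, List.getElem?_set_ne (by omega : y ≠ y')]
      rw [hg]

-- main invariant: A's outer loop accumulates exactly 1000 per hit row
theorem pvAouter_result (uc : String) (board : List (List String)) :
    ∀ (y : Nat) (d s : List Int) (r : Int),
      (pvAouter uc board y (d, s, r)).2.2 = r + 1000 * ((pvBhits uc d board y).length : Int) := by
  induction board with
  | nil => intro y d s r; simp [pvAouter, pvBhits]
  | cons row rest ih =>
      intro y d s r
      simp only [pvAouter]
      rw [pvAinner_eq_rowStep]
      unfold pvRowStep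
      by_cases h1 : uc ∈ row ∧ d.getD y 0 = 0
      · rw [if_pos h1]
        by_cases h2 : row.headD "" = uc
        · rw [if_pos h2]
          have hc : row.take 1 = [uc] ∧ d.getD y 0 = 0 := by
            cases row with
            | nil => exact absurd h1.1 (List.not_mem_nil)
            | cons c cs => exact ⟨by simp at h2; simp [h2], h1.2⟩
          simp only [ih, pvBhits_set uc d y 1 rest (y + 1) (Nat.lt_succ_self y),
            pvBhits, hc]
          simp
          ring
        · rw [if_neg h2]
          have hc : ¬(row.take 1 = [uc] ∧ d.getD y 0 = 0) := by
            intro hx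
            cases row with
            | nil => simp at hx
            | cons c cs =>
                have : c = uc := by simpa using hx.1
                exact h2 (by rw [List.headD_cons, this])
          simp only [ih, pvBhits_set uc d y 1 rest (y + 1) (Nat.lt_succ_self y),
            pvBhits, if_neg hc]
          simp
      · rw [if_neg h1]
        have hc : ¬(row.take 1 = [uc] ∧ d.getD y 0 = 0) := by
          intro hx
          cases row with
          | nil => simp at hx
          | cons c cs =>
              have : c = uc := by simpa using hx.1
              exact h1 ⟨List.mem_cons.mpr (Or.inl this.symm), hx.2⟩
        simp only [ih, pvBhits, if_neg hc]
        simp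

-- ===== VERDICT (by name: the statement is the Claim_ definition above) =====
theorem get1000points_spec : Claim_equal_get1000points := by
  intro board fcd sce uc _ _
  unfold Spec_get1000points get1000points get1000points_alt
  rw [pvAouter_result]
  ring
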